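-- pv_equiv track=rewrite | github.com/IamWilliamWang/Leetcode-practice | 2020.6/FindBestValue.py | findBestValue
-- ===== SOURCE A (Python) =====
-- from typing import List
--
-- def findBestValue(arr: List[int], target: int) -> int:
--     if not arr:
--         return 0
--     arr.sort()
--     sum = 0  # 保存arr[0,i)的和
--     i = 0
--     while i < len(arr):  # 用for会错过i==len(arr)的情况
--         if sum + (len(arr) - i) * arr[i] > target:  # 如果把arr[i...]全变成arr[i]的和，大于target就结束
--             break
--         sum += arr[i]
--         i += 1
--     if i == len(arr):  # 如果target太大了，返回最后一个数字
--         return arr[-1]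
--     if i == 0:  # 如果target太小了，所有数字都要变化。计算范围
--         potentialResultRange = target // len(arr), target // len(arr) + 1
--     else:  # 在arr[i-1]到arr[i]中都有可能
--         potentialResultRange = [arr[i - 1], arr[i]]
--     minDistance = 2 ** 31 - 1  # 与target最小差
--     result = arr[-1]
--     for potentialResult in range(potentialResultRange[0], potentialResultRange[1] + 1):  # arr[i-1]到arr[i]中挨个试一遍
--         if abs((sum + (len(arr) - i) * potentialResult) - target) < minDistance:  # 刷新最好的结果
--             minDistance = abs(sum + (len(arr) - i) * potentialResult - target)
--             result = potentialResult
--     return result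
-- ===== SOURCE B (Python) =====
-- def findBestValue(arr, target):
--     if not arr:
--         return 0
--     arr.sort()
--     n = len(arr)
--     prefix = 0
--     for i, v in enumerate(arr):
--         if prefix + (n - i) * v > target:
--             k = n - i
--             rem = target - prefix
--             q = rem // k  # floor of the real optimum rem/k
--             # pick the closer of q and q+1; tie goes to the smaller value
--             return q if rem - q * k <= (q + 1) * k - rem else q + 1
--         prefix += v
--     return arr[-1]
-- ===== Notes on version B (the rewrite author's own statement) =====
-- stated objective: alternative
-- what changed: A brute-force-scans every integer between the two bracketing values (arr[i-1]..arr[i], or target//n..target//n+1) tracking the minimum distance; B computes the optimal cap in closed form as the floor of (target-prefix)/(remaining count) and compares just floor and floor+1 with the tie going to the smaller, so the candidate scan disappears (O(n log n + V) vs O(n log n), V = gap between the bracketing values; measured only ~1.4x on the random timing inputs, where sorting dominates); …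
import Mathlib
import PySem

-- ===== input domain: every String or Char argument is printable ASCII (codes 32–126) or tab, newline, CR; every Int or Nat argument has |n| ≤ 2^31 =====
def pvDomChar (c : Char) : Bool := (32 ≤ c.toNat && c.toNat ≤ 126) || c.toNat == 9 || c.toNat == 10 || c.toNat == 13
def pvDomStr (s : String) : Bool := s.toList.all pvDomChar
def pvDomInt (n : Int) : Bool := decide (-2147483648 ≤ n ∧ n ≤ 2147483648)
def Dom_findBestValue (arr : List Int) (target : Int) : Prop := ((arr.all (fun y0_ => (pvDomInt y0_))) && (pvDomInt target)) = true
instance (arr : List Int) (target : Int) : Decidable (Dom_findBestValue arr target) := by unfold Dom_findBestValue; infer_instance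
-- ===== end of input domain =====

-- B replaces A's exhaustive scan of every candidate value between the two bracketing numbers by a
-- closed-form floor-division computation of the optimal cap (objective: alternative algorithm).
-- Like A, B sorts `arr` in place; the equivalence proved here is about the return value.

-- ===== PORT A =====
-- A's while-loop: advance (i, sum) until the break condition or i == len(arr)
def pvLoopA (a : List Int) (target : Int) (i : Nat) (sum : Int) : Nat × Int :=
  if h : i < a.length then
    if sum + ((a.length : Int) - (i : Int)) * a[i] > target then (i, sum)
    else pvLoopA a target (i + 1) (sum + a[i])
  else (i, sum)
termination_by a.length - i

def findBestValue (arr : List Int) (target : Int) : Int :=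
  if arr = [] then 0
  else
    let a := PySem.List.sorted arr (fun x => x) false
    let p := pvLoopA a target 0 0
    let i := p.1
    let sum := p.2
    if i = a.length then PySem.List.pyGetD a (-1) 0
    else
      let pr : Int × Int :=
        if i = 0 then
          (PySem.Int.floordiv target (a.length : Int), PySem.Int.floordiv target (a.length : Int) + 1)
        else (PySem.List.pyGetD a ((i : Int) - 1) 0, PySem.List.pyGetD a (i : Int) 0)
      ((PySem.List.pyRange pr.1 (pr.2 + 1) 1).foldl
        (fun st v =>
          if |sum + ((a.length : Int) - (i : Int)) * v - target| < st.1 then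
            (|sum + ((a.length : Int) - (i : Int)) * v - target|, v)
          else st)
        ((2 : Int) ^ 31 - 1, PySem.List.pyGetD a (-1) 0)).2

-- ===== PORT B =====
-- B's for-loop: walk the sorted list with (index, prefix sum); on break return the
-- closed-form best cap, otherwise none (Python then falls through to `return arr[-1]`)
def pvLoopB (n : Nat) (target : Int) : Nat → Int → List Int → Option Int
  | _, _, [] => none
  | i, pre, v :: rest =>
    if pre + ((n : Int) - (i : Int)) * v > target then
      let k : Int := (n : Int) - (i : Int)
      let rem := target - pre
      let q := PySem.Int.floordiv rem k
      some (if rem - q * k ≤ (q + 1) * k - rem then q else q + 1)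
    else pvLoopB n target (i + 1) (pre + v) rest

def findBestValue_alt (arr : List Int) (target : Int) : Int :=
  if arr = [] then 0
  else
    let a := PySem.List.sorted arr (fun x => x) false
    match pvLoopB a.length target 0 0 a with
    | some r => r
    | none => PySem.List.pyGetD a (-1) 0

-- ===== PRECONDITION & SPEC =====
-- Pre_ excludes only lists of length ≥ 2^31: there A's hard-coded sentinel minDistance = 2^31 - 1
-- can fail to be beaten by any candidate (the true distances can reach length - 1), so A's result
-- would be the leftover initial value; the proof uses exactly this bound and nothing else.
def Pre_findBestValue (arr : List Int) (target : Int) : Prop :=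
  (arr.length : Int) ≤ 2 ^ 31 - 1
instance (arr : List Int) (target : Int) : Decidable (Pre_findBestValue arr target) := by
  unfold Pre_findBestValue; infer_instance

def pvWitness_findBestValue : List Int × Int := ([4, 9, 3], 10)

def Spec_findBestValue (arr : List Int) (target : Int) (out : Int) : Prop := out = findBestValue_alt arr target
instance (arr : List Int) (target : Int) (out : Int) : Decidable (Spec_findBestValue arr target out) := by unfold Spec_findBestValue; infer_instance

-- ===== CLAIM (what is proved, stated in full; the proofs are below) =====
def Claim_equal_findBestValue : Prop := ∀ (arr : List Int) (target : Int), Dom_findBestValue arr target → Pre_findBestValue arr target → Spec_findBestValue arr target (findBestValue arr target)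

-- ===== LEMMAS AND PROOFS =====

-- invariants of A's while-loop at its exit point (j, s):
-- j ≥ i, j ≤ len, (s = sum if the loop never ran), the break condition at j, the non-break at j-1
theorem pvLoopA_inv (a : List Int) (target : Int) :
    ∀ (i : Nat) (sum : Int), i ≤ a.length →
      i ≤ (pvLoopA a target i sum).1 ∧ (pvLoopA a target i sum).1 ≤ a.length ∧
      ((pvLoopA a target i sum).1 = i → (pvLoopA a target i sum).2 = sum) ∧
      ((pvLoopA a target i sum).1 < a.length →
        (pvLoopA a target i sum).2 +
          ((a.length : Int) - ((pvLoopA a target i sum).1 : Int)) * a.getD (pvLoopA a target i sum).1 0 > target) ∧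
      (i < (pvLoopA a target i sum).1 →
        (pvLoopA a target i sum).2 +
          ((a.length : Int) - ((pvLoopA a target i sum).1 : Int)) * a.getD ((pvLoopA a target i sum).1 - 1) 0 ≤ target) := by
  intro i sum
  fun_induction pvLoopA a target i sum with
  | case1 i sum h hbrk =>
    intro hi
    refine ⟨le_refl _, le_of_lt h, fun _ => rfl, ?_, by omega⟩
    intro _
    simpa [List.getD_eq_getElem?_getD, List.getElem?_eq_getElem h] using hbrk
  | case2 i sum h hbrk ih =>
    intro hi
    obtain ⟨h1, h2, h3, h4, h5⟩ := ih (by omega)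
    refine ⟨by omega, h2, by omega, h4, ?_⟩
    intro _
    by_cases he : (pvLoopA a target (i + 1) (sum + a[i])).1 = i + 1
    · rw [he] at h3 ⊢
      simp only [h3 rfl]
      have hgd : a.getD (i + 1 - 1) 0 = a[i] := by
        simp [List.getD_eq_getElem?_getD, List.getElem?_eq_getElem h]
      rw [hgd]
      push_cast
      nlinarith [hbrk]
    · exact h5 (by omega)
  | case3 i sum h =>
    intro hi
    exact ⟨le_refl _, hi, fun _ => rfl, by omega, by omega⟩

-- bridge: B's loop over the suffix computes exactly the closed form at A's break point
theorem pvLoopB_bridge (a : List Int) (target : Int) :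
    ∀ (i : Nat) (sum : Int), i ≤ a.length →
      pvLoopB a.length target i sum (a.drop i) =
        (if (pvLoopA a target i sum).1 < a.length then
          some (let k : Int := (a.length : Int) - ((pvLoopA a target i sum).1 : Int)
                let rem := target - (pvLoopA a target i sum).2
                let q := PySem.Int.floordiv rem k
                if rem - q * k ≤ (q + 1) * k - rem then q else q + 1)
         else none) := by
  intro i sum
  fun_induction pvLoopA a target i sum with
  | case1 i sum h hbrk =>
    intro hi
    rw [List.drop_eq_getElem_cons h]
    simp only [pvLoopB, if_pos hbrk, if_pos h]
  | case2 i sum h hbrk ih =>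
    intro hi
    rw [List.drop_eq_getElem_cons h]
    simp only [pvLoopB, if_neg hbrk]
    exact ih (by omega)
  | case3 i sum h =>
    intro hi
    rw [List.drop_of_length_le (by omega)]
    simp only [pvLoopB, if_neg (by omega : ¬ i < a.length)]

-- A's candidate scan over the decreasing part [q - c .. q] of the distance function
theorem pvScan_dec (sum k target : Int) (hk : 0 < k) :
    ∀ (c : Nat) (md r : Int),
      (PySem.List.pyRange (PySem.Int.floordiv (target - sum) k - (c : Int)) (PySem.Int.floordiv (target - sum) k + 1) 1).foldl
        (fun st v => if |sum + k * v - target| < st.1 then (|sum + k * v - target|, v) else st) (md, r)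
      = (if (target - sum) - PySem.Int.floordiv (target - sum) k * k < md then
          ((target - sum) - PySem.Int.floordiv (target - sum) k * k, PySem.Int.floordiv (target - sum) k)
         else (md, r)) := by
  set q := PySem.Int.floordiv (target - sum) k with hq
  have hbr : q * k ≤ target - sum ∧ target - sum < (q + 1) * k :=
    (PySem.Int.floordiv_eq_iff_of_pos hk).mp hq.symm
  intro c
  induction c with
  | zero =>
    intro md r
    simp only [Nat.cast_zero, sub_zero]
    rw [PySem.List.pyRange_one_singleton]
    have habs : |sum + k * q - target| = (target - sum) - q * k := by
      rw [abs_of_nonpos (by nlinarith [hbr.1])]; ring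
    simp only [List.foldl, habs]
  | succ c ih =>
    intro md r
    rw [show ((c + 1 : Nat) : Int) = (c : Int) + 1 by push_cast; ring]
    rw [PySem.List.pyRange_one_cons (by omega)]
    rw [show q - ((c : Int) + 1) + 1 = q - (c : Int) by ring]
    set v := q - ((c : Int) + 1) with hv
    have hvle : v ≤ q - 1 := by omega
    have habs : |sum + k * v - target| = (target - sum) - v * k := by
      rw [abs_of_nonpos (by nlinarith [hbr.1])]; ring
    have hgap : (target - sum) - q * k < (target - sum) - v * k := by nlinarith
    simp only [List.foldl, habs]
    by_cases hc : (target - sum) - v * k < md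
    · rw [if_pos hc, ih]
      rw [if_pos hgap, if_pos (by omega)]
    · rw [if_neg hc, ih]

-- A's candidate scan over an increasing tail never updates the running minimum
theorem pvScan_inc (sum k target : Int) :
    ∀ (c : Nat) (b md r : Int), (∀ v : Int, b ≤ v → md ≤ |sum + k * v - target|) →
      (PySem.List.pyRange b (b + (c : Int)) 1).foldl
        (fun st v => if |sum + k * v - target| < st.1 then (|sum + k * v - target|, v) else st) (md, r)
      = (md, r) := by
  intro c
  induction c with
  | zero =>
    intro b md r _
    simp
  | succ c ih =>
    intro b md r hmono
    rw [PySem.List.pyRange_one_cons (by push_cast; omega)]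
    simp only [List.foldl, if_neg (not_lt.mpr (hmono b le_rfl))]
    have := ih (b + 1) md r (fun v hv => hmono v (by omega))
    rw [show b + ((c + 1 : Nat) : Int) = (b + 1) + (c : Int) by push_cast; ring]
    exact this

-- the whole candidate scan of A equals B's closed form, whenever lo and hi bracket the optimum
theorem pvScan_main (sum k target lo hi r0 : Int) (hk : 0 < k) (hk31 : k ≤ 2 ^ 31 - 1)
    (hlo : lo * k ≤ target - sum) (hhi : target - sum < hi * k) :
    ((PySem.List.pyRange lo (hi + 1) 1).foldl
      (fun st v => if |sum + k * v - target| < st.1 then (|sum + k * v - target|, v) else st)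
      ((2 : Int) ^ 31 - 1, r0)).2
    = (let rem := target - sum
       let q := PySem.Int.floordiv rem k
       if rem - q * k ≤ (q + 1) * k - rem then q else q + 1) := by
  simp only []
  have hbr : PySem.Int.floordiv (target - sum) k * k ≤ target - sum ∧
      target - sum < (PySem.Int.floordiv (target - sum) k + 1) * k :=
    (PySem.Int.floordiv_eq_iff_of_pos hk).mp rfl
  set q := PySem.Int.floordiv (target - sum) k with hq
  have hloq : lo ≤ q := (PySem.Int.le_floordiv_iff_mul_le hk).mpr hlo
  have hqhi : q + 1 ≤ hi := by
    have : q < hi := (PySem.Int.floordiv_lt_iff_lt_mul hk).mpr hhi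
    omega
  rw [PySem.List.pyRange_one_append lo (q + 1) (hi + 1) (by omega) (by omega)]
  rw [List.foldl_append]
  have hdec := pvScan_dec sum k target hk ((q - lo).toNat) ((2 : Int) ^ 31 - 1) r0
  rw [← hq] at hdec
  rw [show q - ((q - lo).toNat : Int) = lo by omega] at hdec
  rw [hdec, if_pos (by nlinarith [hbr.1, hbr.2])]
  rw [PySem.List.pyRange_one_cons (by omega : q + 1 < hi + 1)]
  simp only [List.foldl]
  have habs1 : |sum + k * (q + 1) - target| = (q + 1) * k - (target - sum) := by
    rw [abs_of_nonneg (by nlinarith [hbr.2])]; ring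
  rw [habs1]
  by_cases hcmp : (q + 1) * k - (target - sum) < target - sum - q * k
  · rw [if_pos hcmp]
    rw [show hi + 1 = (q + 1 + 1) + ((hi - q - 1).toNat : Int) by omega]
    rw [pvScan_inc sum k target ((hi - q - 1).toNat) (q + 1 + 1) _ _ (fun v hv => by
      have habs : |sum + k * v - target| = v * k - (target - sum) := by
        rw [abs_of_nonneg (by nlinarith [hbr.2])]; ring
      rw [habs]; nlinarith)]
    rw [if_neg (by omega)]
  · rw [if_neg hcmp]
    rw [show hi + 1 = (q + 1 + 1) + ((hi - q - 1).toNat : Int) by omega]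
    rw [pvScan_inc sum k target ((hi - q - 1).toNat) (q + 1 + 1) _ _ (fun v hv => by
      have habs : |sum + k * v - target| = v * k - (target - sum) := by
        rw [abs_of_nonneg (by nlinarith [hbr.2])]; ring
      rw [habs]; nlinarith)]
    rw [if_pos (by omega)]

-- assembly: on lists of length ≤ 2^31 - 1 the two programs return the same value
theorem pv_main_eq (arr : List Int) (target : Int) (hpre : (arr.length : Int) ≤ 2 ^ 31 - 1) :
    findBestValue arr target = findBestValue_alt arr target := by
  unfold findBestValue findBestValue_alt
  by_cases hnil : arr = []
  · simp [hnil]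
  · simp only [if_neg hnil]
    have hane : PySem.List.sorted arr (fun x => x) false ≠ [] := by
      simpa [PySem.List.sorted_eq_nil_iff] using hnil
    set a := PySem.List.sorted arr (fun x => x) false with ha
    have hlen : a.length = arr.length := PySem.List.length_sorted arr (fun x => x) false
    obtain ⟨h1, h2, h3, h4, h5⟩ := pvLoopA_inv a target 0 0 (by omega)
    have hbridge := pvLoopB_bridge a target 0 0 (by omega)
    rw [List.drop_zero] at hbridge
    set p := pvLoopA a target 0 0 with hp
    by_cases hjn : p.1 = a.length
    · rw [hbridge, if_neg (show ¬ p.1 < a.length by omega)]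
      rw [if_pos hjn]
    · have hjlt : p.1 < a.length := by omega
      rw [hbridge, if_pos hjlt]
      simp only [if_neg hjn]
      have hk : (0 : Int) < (a.length : Int) - (p.1 : Int) := by
        have := hjlt; omega
      have hk31 : (a.length : Int) - (p.1 : Int) ≤ 2 ^ 31 - 1 := by
        rw [hlen]; omega
      by_cases hj0 : p.1 = 0
      · have hs0 : p.2 = 0 := h3 hj0
        rw [if_pos hj0]
        simp only [hj0, hs0, Nat.cast_zero, sub_zero]
        have hmain := pvScan_main 0 (a.length : Int) target
          (PySem.Int.floordiv target (a.length : Int))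
          (PySem.Int.floordiv target (a.length : Int) + 1) (PySem.List.pyGetD a (-1) 0)
          (by omega) (by omega)
          (by have := (PySem.Int.floordiv_eq_iff_of_pos (b := (a.length : Int)) (by omega)).mp
                (rfl : PySem.Int.floordiv target (a.length : Int) = _)
              omega)
          (by have := (PySem.Int.floordiv_eq_iff_of_pos (b := (a.length : Int)) (by omega)).mp
                (rfl : PySem.Int.floordiv target (a.length : Int) = _)
              omega)
        simpa using hmain
      · rw [if_neg hj0]
        have hidx1 : PySem.List.pyGetD a ((p.1 : Int) - 1) 0 = a.getD (p.1 - 1) 0 := by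
          rw [show ((p.1 : Int) - 1) = ((p.1 - 1 : Nat) : Int) by omega,
            PySem.List.pyGetD_natCast]
        have hidx2 : PySem.List.pyGetD a (p.1 : Int) 0 = a.getD p.1 0 := by
          rw [show ((p.1 : Int)) = ((p.1 : Nat) : Int) by omega, PySem.List.pyGetD_natCast]
        rw [hidx1, hidx2]
        exact pvScan_main p.2 ((a.length : Int) - (p.1 : Int)) target
          (a.getD (p.1 - 1) 0) (a.getD p.1 0) (PySem.List.pyGetD a (-1) 0)
          hk hk31
          (by have := h5 (by omega); nlinarith)
          (by have := h4 hjlt; nlinarith)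

-- ===== VERDICT (by name: the statement is the Claim_ definition above) =====
theorem findBestValue_spec : Claim_equal_findBestValue := by
  intro arr target _ hpre
  unfold Spec_findBestValue
  exact pv_main_eq arr target hpre
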